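-- pv_equiv track=rewrite | github.com/Derekviunza/docker-project | data-processor/nlp_standardizer.py | group_by_primary_key
-- ===== SOURCE A (Python) =====
-- from typing import Dict, Iterable, List, Optional
--
-- def group_by_primary_key(items: List[Dict]) -> Dict[str, List[Dict]]:
--     groups: Dict[str, List[Dict]] = {}
--     for it in items:
--         groups.setdefault(it["primary_key"], []).append(it)
--     # keep only real matches (>=2 sources)
--     out = {}
--     for pk, lst in groups.items():
--         sources = {x.get("source", "") for x in lst}
--         if len(lst) > 1 and len(sources) > 1:
--             out[pk] = lst
--     return out
-- ===== SOURCE B (Python) =====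
-- def group_by_primary_key(items):
--     # Pass 1: per key, remember only the first source seen and a boolean that
--     # flips to True when any later item of that key carries a different source
--     # (no group lists are built here). Pass 2: collect, in input order, only
--     # the items whose key was flagged; groups for dropped keys are never built.
--     multi = {}  # pk -> (first_source, has_second_distinct_source)
--     for it in items:
--         pk = it["primary_key"]
--         s = it.get("source", "")
--         if pk in multi:
--             first, flag = multi[pk]
--             if not flag and s != first:
--                 multi[pk] = (first, True)
--         else:
--             multi[pk] = (s, False)
--     out = {}
--     for it in items:
--         pk = it["primary_key"]
--         if multi[pk][1]:
--             out.setdefault(pk, []).append(it)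
--     return out
-- ===== Notes on version B (the rewrite author's own statement) =====
-- stated objective: alternative
-- what changed: B replaces A's group-then-filter (build all group lists, then recompute a source set per group) by a mark-then-collect scheme: a first pass keeps per key only the first source and a boolean flipped when a second distinct source appears, and a second pass collects items of flagged keys only, so group lists for dropped keys are never built and no source sets are materialized.
import Mathlib
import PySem

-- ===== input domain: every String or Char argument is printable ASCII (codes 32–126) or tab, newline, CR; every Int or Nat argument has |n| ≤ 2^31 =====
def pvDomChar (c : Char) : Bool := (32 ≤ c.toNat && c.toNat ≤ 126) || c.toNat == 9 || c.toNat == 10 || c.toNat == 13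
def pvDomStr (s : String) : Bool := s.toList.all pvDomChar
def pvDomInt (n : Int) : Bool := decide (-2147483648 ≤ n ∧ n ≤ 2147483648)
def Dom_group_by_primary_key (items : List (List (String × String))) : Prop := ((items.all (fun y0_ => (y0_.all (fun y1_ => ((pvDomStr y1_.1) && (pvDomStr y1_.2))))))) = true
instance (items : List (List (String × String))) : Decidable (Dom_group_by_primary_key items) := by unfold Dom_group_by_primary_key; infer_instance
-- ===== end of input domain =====

-- B replaces A's group-then-filter with a mark-then-collect scheme: pass 1 keeps, per key,
-- only the first source and a boolean flipped when a second distinct source appears (no group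
-- lists are built); pass 2 collects, in input order, only items of flagged keys.


-- the key and source selectors both programs use; it["primary_key"] is made total via
-- getD "" (inputs missing the key raise KeyError and are outside Pre_); it.get("source","") is exact
def pvKey (it : List (String × String)) : String := (it.lookup "primary_key").getD ""
def pvSrc (it : List (String × String)) : String := (it.lookup "source").getD ""

-- ===== PORT A =====
-- groups = {}; for it: groups.setdefault(it["primary_key"], []).append(it)
-- out = {}; for pk, lst in groups.items(): sources = {x.get("source","") for x in lst};
--           if len(lst) > 1 and len(sources) > 1: out[pk] = lst
def group_by_primary_key (items : List (List (String × String))) : List (String × List (List (String × String))) :=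
  let groups : PySem.Dict String (List (List (String × String))) :=
    items.foldl (fun g it =>
      g.modify (pvKey it) [] (fun l => l ++ [it])) PySem.Dict.empty
  let out : PySem.Dict String (List (List (String × String))) :=
    groups.items.foldl (fun out p =>
      if 1 < p.2.length ∧
         1 < (PySem.Set.ofList (p.2.map (fun x => pvSrc x))).length
      then out.insert p.1 p.2 else out) PySem.Dict.empty
  out.items

-- ===== PORT B =====
-- pass 1: multi = {}; for it: pk = it["primary_key"]; s = it.get("source","");
--         if pk in multi: first, flag = multi[pk]; if not flag and s != first: multi[pk] = (first, True)
--         else: multi[pk] = (s, False)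
-- pass 2: out = {}; for it: if multi[it["primary_key"]][1]: out.setdefault(pk, []).append(it)
-- (multi[pk] in pass 2 always hits, so getD with a dummy default is exact)
def group_by_primary_key_alt (items : List (List (String × String))) : List (String × List (List (String × String))) :=
  let multi : PySem.Dict String (String × Bool) :=
    items.foldl (fun m it =>
      match m.get? (pvKey it) with
      | some fb =>
          if !fb.2 && (pvSrc it != fb.1)
          then m.insert (pvKey it) (fb.1, true) else m
      | none => m.insert (pvKey it) (pvSrc it, false))
      PySem.Dict.empty
  let out : PySem.Dict String (List (List (String × String))) :=
    items.foldl (fun o it =>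
      if (multi.getD (pvKey it) ("", false)).2
      then o.modify (pvKey it) [] (fun l => l ++ [it]) else o)
      PySem.Dict.empty
  out.items

-- ===== PRECONDITION & SPEC =====
-- Pre_ excludes items missing the "primary_key" key, on which the Python A raises KeyError.
def Pre_group_by_primary_key (items : List (List (String × String))) : Prop :=
  ∀ it ∈ items, (it.lookup "primary_key").isSome = true
instance (items : List (List (String × String))) : Decidable (Pre_group_by_primary_key items) := by unfold Pre_group_by_primary_key; infer_instance

def pvWitness_group_by_primary_key : (List (List (String × String))) :=
  [[("primary_key", "a"), ("source", "s1")], [("primary_key", "a"), ("source", "s2")]]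

def Spec_group_by_primary_key (items : List (List (String × String))) (out : List (String × List (List (String × String)))) : Prop := out = group_by_primary_key_alt items
instance (items : List (List (String × String))) (out : List (String × List (List (String × String)))) : Decidable (Spec_group_by_primary_key items out) := by unfold Spec_group_by_primary_key; infer_instance

-- ===== CLAIM (what is proved, stated in full; the proofs are below) =====
def Claim_equal_group_by_primary_key : Prop := ∀ (items : List (List (String × String))), Dom_group_by_primary_key items → Pre_group_by_primary_key items → Spec_group_by_primary_key items (group_by_primary_key items)

-- ===== LEMMAS AND PROOFS =====

-- the group of a key, its distinct sources, and the keep-flag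
def pvGrp (l : List (List (String × String))) (k : String) : List (List (String × String)) :=
  l.filter (fun it => pvKey it == k)
def pvFlag (l : List (List (String × String))) (k : String) : Bool :=
  decide (1 < (PySem.Set.ofList ((pvGrp l k).map pvSrc)).length)

-- A's second loop (insert-under-condition into a dict it is fresh for) is a filter of the items list
lemma foldl_ins_if {ν : Type} (cond : String → ν → Prop) [inst : ∀ k v, Decidable (cond k v)] :
    ∀ (l : List (String × ν)) (acc : PySem.Dict String ν),
      (∀ p ∈ l, acc.contains p.1 = false) → (l.map (·.1)).Nodup →
      (l.foldl (fun out p => if cond p.1 p.2 then out.insert p.1 p.2 else out) acc).items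
        = acc.items ++ l.filter (fun p => decide (cond p.1 p.2))
  | [], acc, _, _ => by simp
  | (k, v) :: t, acc, hf, hn => by
    simp only [List.map_cons, List.nodup_cons] at hn
    by_cases hc : cond k v
    · rw [List.foldl_cons, if_pos hc,
        foldl_ins_if cond t (acc.insert k v)
          (by
            intro q hq
            rw [PySem.Dict.contains_insert]
            have h1 : (q.1 == k) = false := by
              simp only [beq_eq_false_iff_ne]
              intro h; exact hn.1 (h ▸ List.mem_map_of_mem hq)
            simp [h1, hf q (List.mem_cons_of_mem _ hq)])
          hn.2,
        PySem.Dict.items_insert_of_not_contains _ _ (hf (k, v) List.mem_cons_self)]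
      simp [hc]
    · rw [List.foldl_cons, if_neg hc,
        foldl_ins_if cond t acc (fun q hq => hf q (List.mem_cons_of_mem _ hq)) hn.2]
      simp [hc]

-- the groups dict a grouping loop builds: lookup = the key's group, in input order
lemma getD_groups (l : List (List (String × String))) (d : PySem.Dict String (List (List (String × String)))) (c : String) :
    (l.foldl (fun g it => g.modify (pvKey it) [] (fun ls => ls ++ [it])) d).getD c []
      = d.getD c [] ++ pvGrp l c := by
  have h : l.foldl (fun g it => g.modify (pvKey it) [] (fun ls => ls ++ [it])) d
      = (l.map (fun it => (pvKey it, it))).foldl (fun g p => g.modify p.1 [] (fun ls => ls ++ [p.2])) d := by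
    rw [List.foldl_map]
  rw [h, PySem.Dict.getD_foldl_modify_append]
  simp [pvGrp, List.filter_map, Function.comp_def]

-- full characterization of the grouping loop's items list
lemma items_groups (l : List (List (String × String))) :
    (l.foldl (fun g it => g.modify (pvKey it) [] (fun ls => ls ++ [it])) PySem.Dict.empty).items
      = (PySem.Set.ofList (l.map pvKey)).map (fun k => (k, pvGrp l k)) := by
  set G := l.foldl (fun g it => g.modify (pvKey it) [] (fun ls => ls ++ [it])) PySem.Dict.empty with hG
  have hnd : G.keys.Nodup :=
    PySem.Dict.nodup_keys_foldl_modify_key l pvKey [] (fun _ it ls => ls ++ [it])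
      PySem.Dict.empty (by simp)
  have hkeys : G.keys = PySem.Set.ofList (l.map pvKey) := by
    rw [hG, PySem.Dict.keys_foldl_modify_key]
    simp [PySem.Set.update_nil_left]
  rw [PySem.Dict.items_eq_map_keys G hnd [], hkeys]
  apply List.map_congr_left
  intro k _
  rw [hG, getD_groups]
  simp

-- set-of-a-filtered-list = filtered set
lemma ofList_filter (q : String → Bool) (xs : List String) :
    PySem.Set.ofList (xs.filter q) = (PySem.Set.ofList xs).filter q := by
  induction xs using List.reverseRecOn with
  | nil => simp
  | append_singleton xs x ih =>
    rw [List.filter_append]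
    by_cases hq : q x = true
    · have hx : List.filter q [x] = [x] := by simp [hq]
      rw [hx, PySem.Set.ofList_append_singleton, PySem.Set.ofList_append_singleton, ih,
        PySem.Set.add_eq_ite, PySem.Set.add_eq_ite]
      by_cases hm : x ∈ PySem.Set.ofList xs
      · have : x ∈ (PySem.Set.ofList xs).filter q := List.mem_filter.2 ⟨hm, hq⟩
        simp [hm, this]
      · have : x ∉ (PySem.Set.ofList xs).filter q := fun h => hm (List.mem_filter.1 h).1
        simp [hm, this, hq]
    · have hx : List.filter q [x] = [] := by simp [hq]
      rw [hx, List.append_nil, PySem.Set.ofList_append_singleton, ih, PySem.Set.add_eq_ite]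
      by_cases hm : x ∈ PySem.Set.ofList xs
      · simp [hm]
      · simp [hm, hq]

-- a loop that conditionally updates, with a condition not touching the accumulator, folds the filtered list
lemma foldl_if_filter {α β : Type} (p : α → Bool) (f : β → α → β) :
    ∀ (l : List α) (b : β),
      l.foldl (fun b a => if p a then f b a else b) b = (l.filter p).foldl f b
  | [], _ => rfl
  | a :: t, b => by
    by_cases h : p a = true
    · rw [List.foldl_cons, if_pos h, List.filter_cons, if_pos h, List.foldl_cons,
        foldl_if_filter p f t (f b a)]
    · rw [List.foldl_cons, if_neg h, List.filter_cons, if_neg h,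
        foldl_if_filter p f t b]

-- the length of a set never drops when an element is added
lemma length_add_ge (s : PySem.Set String) (x : String) :
    s.length ≤ (PySem.Set.add s x).length := by
  rw [PySem.Set.add_eq_ite]; split <;> simp

-- a key whose flag is still false has exactly one distinct source, the first item's
lemma flag_false_srcset (l : List (List (String × String))) (k : String)
    (y : List (String × String)) (t : List (List (String × String)))
    (hg : pvGrp l k = y :: t) (hf : pvFlag l k = false) :
    PySem.Set.ofList ((pvGrp l k).map pvSrc) = [pvSrc y] := by
  unfold pvFlag at hf
  rw [hg] at hf ⊢
  rw [List.map_cons, PySem.Set.ofList_cons] at hf ⊢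
  have h0 : (PySem.Set.discard (PySem.Set.ofList (t.map pvSrc)) (pvSrc y)).length = 0 := by
    simp only [decide_eq_false_iff_not, not_lt, List.length_cons] at hf
    omega
  rw [List.length_eq_zero_iff] at h0
  rw [h0]

-- appending one item extends only its key's group
lemma pvGrp_append (l : List (List (String × String))) (x : List (String × String)) (c : String) :
    pvGrp (l ++ [x]) c = pvGrp l c ++ (if pvKey x == c then [x] else []) := by
  unfold pvGrp
  rw [List.filter_append]
  congr 1
  by_cases h : (pvKey x == c) = true <;> simp [h]

-- pass 1 of B: the entry at k is (source of the first item of k's group, the keep-flag)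
lemma get?_multi (l : List (List (String × String))) :
    ∀ (k : String), (l.foldl (fun m it =>
      match m.get? (pvKey it) with
      | some fb => if !fb.2 && (pvSrc it != fb.1) then m.insert (pvKey it) (fb.1, true) else m
      | none => m.insert (pvKey it) (pvSrc it, false)) PySem.Dict.empty).get? k
      = (pvGrp l k).head?.map (fun x => (pvSrc x, pvFlag l k)) := by
  induction l using List.reverseRecOn with
  | nil => intro k; simp [pvGrp]
  | append_singleton l x ih =>
    intro k
    rw [List.foldl_append, List.foldl_cons, List.foldl_nil]
    rcases hg : pvGrp l (pvKey x) with _ | ⟨y, t⟩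
    · -- first item with this key: the dict had no entry, insert (src, False)
      have h0 := ih (pvKey x)
      rw [hg] at h0
      simp only [List.head?_nil, Option.map_none] at h0
      simp only [h0]
      by_cases hk : k = pvKey x
      · subst hk
        rw [PySem.Dict.get?_insert, if_pos rfl, pvGrp_append, hg]
        have hfl : pvFlag (l ++ [x]) (pvKey x) = false := by
          unfold pvFlag
          rw [pvGrp_append, hg]
          simp [PySem.Set.ofList_eq_self_of_nodup]
        simp [hfl]
      · rw [PySem.Dict.get?_insert, if_neg hk, ih k, pvGrp_append]
        have hne : (pvKey x == k) = false := by rw [beq_eq_false_iff_ne]; exact fun h => hk (Eq.symm h)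
        have hfl : pvFlag (l ++ [x]) k = pvFlag l k := by
          unfold pvFlag; rw [pvGrp_append, hne]; simp
        simp [hne, hfl]
    · -- the key already has a group y :: t
      have h0 := ih (pvKey x)
      rw [hg] at h0
      simp only [List.head?_cons, Option.map_some] at h0
      simp only [h0]
      by_cases hk : k = pvKey x
      · subst hk
        have hgx : pvGrp (l ++ [x]) (pvKey x) = (y :: t) ++ [x] := by
          rw [pvGrp_append, hg]; simp
        by_cases hc : (!pvFlag l (pvKey x) && (pvSrc x != pvSrc y)) = true
        · rw [if_pos hc, PySem.Dict.get?_insert, if_pos rfl, hgx]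
          simp only [Bool.and_eq_true, Bool.not_eq_true', bne_iff_ne] at hc
          have hfl : pvFlag (l ++ [x]) (pvKey x) = true := by
            unfold pvFlag
            rw [hgx, ← hg, List.map_append, PySem.Set.ofList_append,
              flag_false_srcset l (pvKey x) y t hg hc.1]
            have hnm : pvSrc x ∉ ([pvSrc y] : List String) := by simp [hc.2]
            rw [List.map_cons, List.map_nil, PySem.Set.update_cons, PySem.Set.update_nil,
              PySem.Set.add_of_not_mem hnm]
            simp
          simp [hfl]
        · rw [if_neg hc, ih (pvKey x), hgx, hg]
          simp only [List.head?_cons, Option.map_some]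
          have hfl : pvFlag (l ++ [x]) (pvKey x) = pvFlag l (pvKey x) := by
            unfold pvFlag
            rw [hgx, ← hg, List.map_append, List.map_cons, List.map_nil,
              PySem.Set.ofList_append, PySem.Set.update_cons, PySem.Set.update_nil]
            simp only [Bool.and_eq_true, Bool.not_eq_true', bne_iff_ne, not_and, not_not] at hc
            by_cases hf : pvFlag l (pvKey x) = true
            · have h1 : pvFlag l (pvKey x) = true := hf
              unfold pvFlag at h1
              simp only [decide_eq_true_eq] at h1
              have h2 := length_add_ge (PySem.Set.ofList ((pvGrp l (pvKey x)).map pvSrc)) (pvSrc x)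
              simp only [decide_eq_decide]
              omega
            · have hf' : pvFlag l (pvKey x) = false := by
                cases hfv : pvFlag l (pvKey x)
                · rfl
                · exact absurd hfv hf
              have hxy : pvSrc x = pvSrc y := hc hf'
              rw [flag_false_srcset l (pvKey x) y t hg hf', hxy,
                PySem.Set.add_of_mem (by simp : pvSrc y ∈ ([pvSrc y] : List String)),
                ← flag_false_srcset l (pvKey x) y t hg hf']
          simp [hfl]
      · have hne : (pvKey x == k) = false := by rw [beq_eq_false_iff_ne]; exact fun h => hk (Eq.symm h)
        have hfl : pvFlag (l ++ [x]) k = pvFlag l k := by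
          unfold pvFlag; rw [pvGrp_append, hne]; simp
        by_cases hc : (!pvFlag l (pvKey x) && (pvSrc x != pvSrc y)) = true
        · rw [if_pos hc, PySem.Dict.get?_insert, if_neg hk, ih k, pvGrp_append, hne]
          simp [hfl]
        · rw [if_neg hc, ih k, pvGrp_append, hne]
          simp [hfl]

-- ===== VERDICT (by name: the statement is the Claim_ definition above) =====
theorem group_by_primary_key_spec : Claim_equal_group_by_primary_key := by
  intro items _ _
  unfold Spec_group_by_primary_key group_by_primary_key group_by_primary_key_alt
  dsimp only
  -- A's side: the grouping dict, then its items filtered by A's condition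
  set groups : PySem.Dict String (List (List (String × String))) :=
    items.foldl (fun g it => g.modify (pvKey it) [] (fun l => l ++ [it])) PySem.Dict.empty
    with hgroups
  have hnodup : groups.keys.Nodup := by
    rw [hgroups]
    exact PySem.Dict.nodup_keys_foldl_modify_key items pvKey [] (fun _ it ls => ls ++ [it])
      PySem.Dict.empty (by simp)
  rw [foldl_ins_if
      (fun k v => 1 < v.length ∧ 1 < (PySem.Set.ofList (v.map (fun x => pvSrc x))).length)
      groups.items PySem.Dict.empty (by simp) (by exact hnodup)]
  have hie : (PySem.Dict.empty : PySem.Dict String (List (List (String × String)))).items = [] := rfl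
  rw [hie, List.nil_append, hgroups, items_groups, List.filter_map]
  -- B's side: pass 2 folds the filtered list, whose grouping dict we characterize
  set multi : PySem.Dict String (String × Bool) :=
    items.foldl (fun m it =>
      match m.get? (pvKey it) with
      | some fb => if !fb.2 && (pvSrc it != fb.1) then m.insert (pvKey it) (fb.1, true) else m
      | none => m.insert (pvKey it) (pvSrc it, false)) PySem.Dict.empty with hmulti
  rw [foldl_if_filter (fun it => (multi.getD (pvKey it) ("", false)).2)
      (fun o it => o.modify (pvKey it) [] (fun l => l ++ [it])) items
      (PySem.Dict.empty : PySem.Dict String (List (List (String × String)))), items_groups]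
  -- the flag looked up for an item of the list is pvFlag at its key
  have hflag : ∀ it ∈ items, (multi.getD (pvKey it) ("", false)).2 = pvFlag items (pvKey it) := by
    intro it hit
    rcases hgr : pvGrp items (pvKey it) with _ | ⟨y, t⟩
    · exfalso
      have : it ∈ pvGrp items (pvKey it) := List.mem_filter.2 ⟨hit, by simp⟩
      rw [hgr] at this; exact (List.not_mem_nil) this
    · rw [PySem.Dict.getD_eq_get?_getD, hmulti, get?_multi items (pvKey it), hgr]
      rfl
  -- the filtered list's key set, and its groups, are those of the original list
  have hsame : items.filter (fun it => (multi.getD (pvKey it) ("", false)).2)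
      = items.filter (fun it => pvFlag items (pvKey it)) := List.filter_congr hflag
  rw [hsame]
  have hmapfil : (items.filter (fun it => pvFlag items (pvKey it))).map pvKey
      = (items.map pvKey).filter (fun k => pvFlag items k) := by
    rw [List.filter_map]; rfl
  rw [hmapfil, ofList_filter]
  -- A's keep condition is exactly pvFlag
  have hAcond : ∀ k, (decide (1 < (pvGrp items k).length ∧
      1 < (PySem.Set.ofList ((pvGrp items k).map (fun x => pvSrc x))).length))
      = pvFlag items k := by
    intro k
    unfold pvFlag
    simp only [decide_eq_decide]
    have h1 := PySem.Set.length_ofList_le ((pvGrp items k).map pvSrc)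
    rw [List.length_map] at h1
    constructor
    · exact fun h => h.2
    · exact fun h => ⟨by omega, h⟩
  have hfilA : (PySem.Set.ofList (items.map pvKey)).filter
        ((fun p => decide (1 < p.2.length ∧ 1 < (PySem.Set.ofList (p.2.map (fun x => pvSrc x))).length))
          ∘ (fun k => (k, pvGrp items k)))
      = (PySem.Set.ofList (items.map pvKey)).filter (fun k => pvFlag items k) := by
    apply List.filter_congr
    intro k _
    exact hAcond k
  rw [hfilA]
  -- finally the group kept for a flagged key is unchanged by the pre-filtering
  apply List.map_congr_left
  intro k hk
  have hkflag : pvFlag items k = true := (List.mem_filter.1 hk).2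
  have : pvGrp (items.filter (fun it => pvFlag items (pvKey it))) k = pvGrp items k := by
    unfold pvGrp
    rw [List.filter_filter]
    apply List.filter_congr
    intro it _
    by_cases hkey : (pvKey it == k) = true
    · have : pvKey it = k := by simpa using hkey
      rw [hkey, this, hkflag]
      rfl
    · simp at hkey
      simp [hkey]
  rw [this]
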